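-- pv_equiv track=rewrite | github.com/horeckyt/MUNI | tyden9/tyden9.py | maxim
-- ===== SOURCE A (Python) =====
-- def maxim(l, left, right):
--     if abs(left - right) < 2:
--         if l[left] < l[right]:
--             return l[right]
--         return l[left]
--
--     center = (left + right) // 2
--
--     x = maxim(l, left, center)
--     y = maxim(l, center + 1, right)
--
--     if x < y:
--         return y
--     return x
-- ===== SOURCE B (Python) =====
-- def maxim(l, left, right):
--     m = l[left]
--     for i in range(left + 1, right + 1):
--         if m < l[i]:
--             m = l[i]
--     return m
-- ===== Notes on version B (the rewrite author's own statement) =====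
-- stated objective: simpler
-- what changed: Replaces the divide-and-conquer recursion (split at the midpoint, recurse on both halves, combine with a comparison) by a single iterative left-to-right scan keeping the running maximum.
-- outside the precondition, e.g. on maxim([3, 7, 5], 0, -1): A returns 5, B returns 3; on maxim([9, 1], 1, 0): A returns 9, B returns 1
import Mathlib
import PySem

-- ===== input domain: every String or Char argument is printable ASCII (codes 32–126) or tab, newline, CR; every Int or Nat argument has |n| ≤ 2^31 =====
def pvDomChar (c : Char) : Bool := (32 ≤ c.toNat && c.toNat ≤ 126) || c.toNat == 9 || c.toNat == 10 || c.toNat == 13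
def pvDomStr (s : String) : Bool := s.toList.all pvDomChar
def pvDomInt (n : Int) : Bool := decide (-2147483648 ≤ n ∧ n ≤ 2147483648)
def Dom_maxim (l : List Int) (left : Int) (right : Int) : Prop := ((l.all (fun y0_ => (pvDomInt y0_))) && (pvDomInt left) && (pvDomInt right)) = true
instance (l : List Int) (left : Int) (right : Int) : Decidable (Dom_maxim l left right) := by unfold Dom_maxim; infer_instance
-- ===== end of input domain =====

-- B replaces A's divide-and-conquer recursion by a single iterative scan with a running maximum (objective: simpler).

-- ===== PORT A =====
-- fuel makes the recursion total in Lean; inside Pre_ the fuel (right-left)+1 is never exhausted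
def maximFuel (fuel : Nat) (l : List Int) (left right : Int) : Int :=
  match fuel with
  | 0 => 0
  | fuel + 1 =>
    if |left - right| < 2 then
      if PySem.List.pyGetD l left 0 < PySem.List.pyGetD l right 0 then
        PySem.List.pyGetD l right 0
      else
        PySem.List.pyGetD l left 0
    else
      let center := PySem.Int.floordiv (left + right) 2
      let x := maximFuel fuel l left center
      let y := maximFuel fuel l (center + 1) right
      if x < y then y else x

def maxim (l : List Int) (left : Int) (right : Int) : Int :=
  maximFuel ((right - left).toNat + 1) l left right

-- ===== PORT B =====
def maxim_alt (l : List Int) (left : Int) (right : Int) : Int :=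
  (PySem.List.pyRange (left + 1) (right + 1) 1).foldl
    (fun m i => if m < PySem.List.pyGetD l i 0 then PySem.List.pyGetD l i 0 else m)
    (PySem.List.pyGetD l left 0)

-- ===== PRECONDITION & SPEC =====
-- Pre_ requires left ≤ right with both valid Python indices (-len(l) ≤ left, right < len(l)); outside it
-- A raises IndexError/RecursionError, or on backwards pairs (left > right) returns a value that is an
-- accident of its base case reading a reversed pair — a corner no caller would specify; B raises or
-- returns its own accidental value there.
def Pre_maxim (l : List Int) (left : Int) (right : Int) : Prop :=
  left ≤ right ∧ -(l.length : Int) ≤ left ∧ right < l.length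
instance (l : List Int) (left : Int) (right : Int) : Decidable (Pre_maxim l left right) := by
  unfold Pre_maxim; infer_instance

def pvWitness_maxim : List Int × Int × Int := ([1, 5, 3], 0, 2)

def Spec_maxim (l : List Int) (left : Int) (right : Int) (out : Int) : Prop := out = maxim_alt l left right
instance (l : List Int) (left : Int) (right : Int) (out : Int) : Decidable (Spec_maxim l left right out) := by unfold Spec_maxim; infer_instance

-- ===== CLAIM (what is proved, stated in full; the proofs are below) =====
def Claim_equal_maxim : Prop := ∀ (l : List Int) (left : Int) (right : Int), Dom_maxim l left right → Pre_maxim l left right → Spec_maxim l left right (maxim l left right)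

-- ===== LEMMAS AND PROOFS =====

-- B's loop step is a max
theorem maxim_step_eq_max (m g : Int) : (if m < g then g else m) = max m g := by
  rw [max_def]; split_ifs <;> omega

theorem maxim_foldl_max_pull (l : List Int) (L : List Int) (x s : Int) :
    L.foldl (fun m i => max m (PySem.List.pyGetD l i 0)) (max x s)
      = max x (L.foldl (fun m i => max m (PySem.List.pyGetD l i 0)) s) := by
  induction L generalizing s with
  | nil => rfl
  | cons a L ih =>
    simp only [List.foldl_cons, max_assoc]
    exact ih (max s (PySem.List.pyGetD l a 0))

theorem maxim_alt_eq_foldl_max (l : List Int) (a b : Int) :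
    maxim_alt l a b
      = (PySem.List.pyRange (a + 1) (b + 1) 1).foldl
          (fun m i => max m (PySem.List.pyGetD l i 0)) (PySem.List.pyGetD l a 0) := by
  unfold maxim_alt
  congr 1
  funext m i
  exact maxim_step_eq_max m (PySem.List.pyGetD l i 0)

-- single element
theorem maxim_alt_same (l : List Int) (a : Int) :
    maxim_alt l a a = PySem.List.pyGetD l a 0 := by
  unfold maxim_alt
  rw [PySem.List.pyRange_one_eq_nil (by omega)]
  rfl

-- combine: the scan over [a..b] splits at any c with a ≤ c < b
theorem maxim_alt_split (l : List Int) (a c b : Int) (h1 : a ≤ c) (h2 : c < b) :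
    maxim_alt l a b = max (maxim_alt l a c) (maxim_alt l (c + 1) b) := by
  rw [maxim_alt_eq_foldl_max, maxim_alt_eq_foldl_max, maxim_alt_eq_foldl_max]
  rw [PySem.List.pyRange_one_append (a + 1) (c + 1) (b + 1) (by omega) (by omega)]
  rw [List.foldl_append]
  rw [PySem.List.pyRange_one_cons (by omega : c + 1 < b + 1)]
  simp only [List.foldl_cons]
  exact maxim_foldl_max_pull l _ _ _

-- A's recursion computes the same scan, for any sufficient fuel
theorem maximFuel_eq_alt (fuel : Nat) :
    ∀ (l : List Int) (a b : Int), a ≤ b → (b - a).toNat < fuel →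
      maximFuel fuel l a b = maxim_alt l a b := by
  induction fuel with
  | zero => intro l a b _ h; omega
  | succ n ih =>
    intro l a b hab hfuel
    unfold maximFuel
    by_cases hbase : |a - b| < 2
    · have hb' : -2 < a - b ∧ a - b < 2 := abs_lt.mp hbase
      rw [if_pos hbase]
      have : b = a ∨ b = a + 1 := by omega
      rcases this with h | h
      · subst h
        rw [maxim_alt_same, if_neg (lt_irrefl _)]
      · subst h
        unfold maxim_alt
        rw [PySem.List.pyRange_one_singleton]
        simp only [List.foldl_cons, List.foldl_nil]
    · have hb' : ¬(-2 < a - b ∧ a - b < 2) := fun h => hbase (abs_lt.mpr h)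
      rw [if_neg hbase]
      have hgap : a + 2 ≤ b := by omega
      have hc := PySem.Int.floordiv_two_mid_bounds (le_of_lt (by omega : a < b))
      set c := PySem.Int.floordiv (a + b) 2 with hcdef
      have hclt : c < b := by
        have : PySem.Int.floordiv (a + b) 2 < b := by
          rw [PySem.Int.floordiv_lt_iff_lt_mul (by omega : (0:Int) < 2)]
          omega
        omega
      have hcge : a ≤ c := hc.1
      show (if maximFuel n l a c < maximFuel n l (c + 1) b then maximFuel n l (c + 1) b
            else maximFuel n l a c) = maxim_alt l a b
      rw [ih l a c hcge (by omega), ih l (c + 1) b (by omega) (by omega)]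
      rw [maxim_alt_split l a c b hcge hclt]
      rw [maxim_step_eq_max]

-- ===== VERDICT (by name: the statement is the Claim_ definition above) =====
theorem maxim_spec : Claim_equal_maxim := by
  intro l left right _ hpre
  unfold Spec_maxim maxim
  exact maximFuel_eq_alt _ l left right hpre.1 (by omega)
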